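-- pv_equiv track=rewrite | github.com/JordanGunn/agent-slop-lint | src/cli/slop/_structural/composition.py | _find_inheritance_pairs
-- ===== SOURCE A (Python) =====
-- def _find_inheritance_pairs(
--     relation: dict[str, set[str]],
--     min_parent_ops: int = 2,
-- ) -> list[tuple[str, str]]:
--     """Pairs ``(parent, child)`` where child's intent ⊃ parent's strictly,
--     parent has at least ``min_parent_ops`` operations, and no entity sits
--     between them in the lattice.
--     """
--     out: list[tuple[str, str]] = []
--     for a in relation:
--         if len(relation[a]) < min_parent_ops:
--             continue
--         for b in relation:
--             if a == b:
--                 continue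
--             if not relation[a] or not (relation[a] < relation[b]):
--                 continue
--             minimal = True
--             for c in relation:
--                 if c in (a, b):
--                     continue
--                 if relation[a] < relation[c] < relation[b]:
--                     minimal = False
--                     break
--             if minimal:
--                 out.append((a, b))
--     return out
-- ===== SOURCE B (Python) =====
-- def _find_inheritance_pairs(
--     relation: dict[str, set[str]],
--     min_parent_ops: int = 2,
-- ) -> list[tuple[str, str]]:
--     """Relational-algebra staging: build the full strict-containment edge
--     set, subtract its self-composition (edges reachable in two steps) to
--     get the covering relation, then enumerate it in dict order with the
--     parent-size filter applied last."""
--     keys = list(relation)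
--     edges = {(a, b) for a in keys for b in keys
--              if a != b and relation[a] and relation[a] < relation[b]}
--     two_step = {(a, b2) for (a, c) in edges for (c2, b2) in edges if c == c2}
--     covers = edges - two_step
--     return [(a, b) for a in keys
--             if len(relation[a]) >= min_parent_ops
--             for b in keys if (a, b) in covers]
-- ===== Notes on version B (the rewrite author's own statement) =====
-- stated objective: alternative
-- what changed: B replaces A's per-pair 'is there a c strictly between' inner scan by relational-algebra staging: it materialises the whole strict-containment edge set once, subtracts the edge set's self-composition (two-step reachability) to obtain the covering relation, and only then enumerates the covers in dict order with the min_parent_ops filter applied as a final pass.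
import Mathlib
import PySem

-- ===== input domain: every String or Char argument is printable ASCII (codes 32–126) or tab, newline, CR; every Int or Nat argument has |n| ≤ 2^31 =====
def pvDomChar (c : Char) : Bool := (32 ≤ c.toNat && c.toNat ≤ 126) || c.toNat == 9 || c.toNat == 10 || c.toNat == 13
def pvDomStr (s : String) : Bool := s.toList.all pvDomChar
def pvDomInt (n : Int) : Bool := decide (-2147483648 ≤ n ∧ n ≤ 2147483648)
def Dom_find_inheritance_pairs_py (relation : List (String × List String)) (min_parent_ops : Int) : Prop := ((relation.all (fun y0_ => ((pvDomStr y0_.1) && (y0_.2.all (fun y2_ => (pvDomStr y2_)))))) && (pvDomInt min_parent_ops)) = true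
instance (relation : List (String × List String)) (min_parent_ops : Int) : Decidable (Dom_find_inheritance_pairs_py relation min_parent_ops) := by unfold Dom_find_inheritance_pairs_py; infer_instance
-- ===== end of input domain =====

-- B builds the global strict-containment edge set once, subtracts its self-composition to get
-- the covering relation, and enumerates it in dict order, instead of A's per-pair scan for an
-- intermediate entity (objective: alternative).

-- ===== PORT A =====
-- shared primitives of both Pythons: relation[k] (dict lookup; total under Pre_, every
-- looked-up key is a key of the dict) and Python's strict set comparison s < t
def pvGet (relation : List (String × List String)) (k : String) : List String :=
  (PySem.Dict.mk relation).getD k []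

def pvSetLt (s t : List String) : Bool :=
  PySem.Set.issubset s t && !(PySem.Set.issubset t s)

def find_inheritance_pairs_py (relation : List (String × List String)) (min_parent_ops : Int) : List (String × String) :=
  let get := pvGet relation
  let keys := relation.map Prod.fst
  keys.foldl (fun out a =>
    if ((get a).length : Int) < min_parent_ops then out
    else keys.foldl (fun out b =>
      if a == b then out
      else if (get a).isEmpty || !(pvSetLt (get a) (get b)) then out
      else if keys.all (fun c =>
          if c == a || c == b then true
          else !(pvSetLt (get a) (get c) && pvSetLt (get c) (get b))) then
        out ++ [(a, b)]
      else out) out) []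

-- ===== PORT B =====
def find_inheritance_pairs_py_alt (relation : List (String × List String)) (min_parent_ops : Int) : List (String × String) :=
  let get := pvGet relation
  let keys := relation.map Prod.fst
  let edges : PySem.Set (String × String) := PySem.Set.ofList
    (keys.flatMap (fun a => keys.filterMap (fun b =>
      if a != b && !(get a).isEmpty && pvSetLt (get a) (get b) then some (a, b) else none)))
  let two_step : PySem.Set (String × String) := PySem.Set.ofList
    (edges.flatMap (fun p => edges.filterMap (fun q =>
      if p.2 == q.1 then some (p.1, q.2) else none)))
  let covers := PySem.Set.diff edges two_step
  keys.foldl (fun out a =>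
    if min_parent_ops ≤ ((get a).length : Int) then
      out ++ (keys.filter (fun b => PySem.Set.contains covers (a, b))).map (fun b => (a, b))
    else out) []

-- ===== PRECONDITION & SPEC =====
-- Pre_ excludes association lists with duplicate keys or duplicates inside a value list:
-- the Python arguments are a dict and sets, which cannot contain duplicates, so no Python
-- input corresponds to such a list.
def Pre_find_inheritance_pairs_py (relation : List (String × List String)) (min_parent_ops : Int) : Prop :=
  (relation.map Prod.fst).Nodup ∧ ∀ p ∈ relation, p.2.Nodup
instance (relation : List (String × List String)) (min_parent_ops : Int) : Decidable (Pre_find_inheritance_pairs_py relation min_parent_ops) := by unfold Pre_find_inheritance_pairs_py; infer_instance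

def pvWitness_find_inheritance_pairs_py : (List (String × List String)) × Int :=
  ([("a", ["x"]), ("b", ["x", "y"])], 1)

def Spec_find_inheritance_pairs_py (relation : List (String × List String)) (min_parent_ops : Int) (out : List (String × String)) : Prop := out = find_inheritance_pairs_py_alt relation min_parent_ops
instance (relation : List (String × List String)) (min_parent_ops : Int) (out : List (String × String)) : Decidable (Spec_find_inheritance_pairs_py relation min_parent_ops out) := by unfold Spec_find_inheritance_pairs_py; infer_instance

-- ===== CLAIM (what is proved, stated in full; the proofs are below) =====
def Claim_equal_find_inheritance_pairs_py : Prop := ∀ (relation : List (String × List String)) (min_parent_ops : Int), Dom_find_inheritance_pairs_py relation min_parent_ops → Pre_find_inheritance_pairs_py relation min_parent_ops → Spec_find_inheritance_pairs_py relation min_parent_ops (find_inheritance_pairs_py relation min_parent_ops)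

-- ===== LEMMAS AND PROOFS =====

-- Python's s < t never holds reflexively
theorem pvSetLt_irrefl (s : List String) : pvSetLt s s = false := by
  simp [pvSetLt]

-- s < t forces t nonempty
theorem pvSetLt_ne_nil {s t : List String} (h : pvSetLt s t = true) : t.isEmpty = false := by
  cases t with
  | nil => simp [pvSetLt, PySem.Set.issubset] at h
  | cons x xs => rfl

-- the edge list B builds, abstracted over keys and lookup
def pvEdges (keys : List String) (g : String → List String) : List (String × String) :=
  keys.flatMap (fun a => keys.filterMap (fun b =>
    if a != b && !(g a).isEmpty && pvSetLt (g a) (g b) then some (a, b) else none))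

theorem mem_pvEdges (keys : List String) (g : String → List String) (p : String × String) :
    p ∈ pvEdges keys g ↔
      p.1 ∈ keys ∧ p.2 ∈ keys ∧ p.1 ≠ p.2 ∧ (g p.1).isEmpty = false ∧ pvSetLt (g p.1) (g p.2) = true := by
  obtain ⟨a, b⟩ := p
  simp only [pvEdges, List.mem_flatMap, List.mem_filterMap]
  constructor
  · rintro ⟨a', ha', b', hb', h⟩
    split at h
    · rename_i hc
      obtain ⟨h1, h2⟩ := Prod.mk.injEq .. ▸ Option.some.injEq .. ▸ h
      subst h1; subst h2
      simp only [bne_iff_ne, ne_eq, Bool.and_eq_true, Bool.not_eq_true'] at hc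
      exact ⟨ha', hb', hc.1.1, hc.1.2, hc.2⟩
    · exact absurd h (by simp)
  · rintro ⟨ha, hb, hne, hemp, hlt⟩
    exact ⟨a, ha, b, hb, by simp [hne, hemp, hlt]⟩

theorem pv_core (keys : List String) (g : String → List String) (m : Int) :
    keys.foldl (fun out a =>
      if ((g a).length : Int) < m then out
      else keys.foldl (fun out b =>
        if a == b then out
        else if ((g a).isEmpty || !(pvSetLt (g a) (g b))) then out
        else if keys.all (fun c => if c == a || c == b then true
            else !(pvSetLt (g a) (g c) && pvSetLt (g c) (g b))) then out ++ [(a, b)] else out) out) []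
    =
    keys.foldl (fun out a =>
       if m ≤ ((g a).length : Int) then
         out ++ (keys.filter (fun b => PySem.Set.contains
           (PySem.Set.diff (PySem.Set.ofList (pvEdges keys g))
             (PySem.Set.ofList ((PySem.Set.ofList (pvEdges keys g)).flatMap
               (fun p => (PySem.Set.ofList (pvEdges keys g)).filterMap (fun q =>
                 if p.2 == q.1 then some (p.1, q.2) else none)))))
           (a, b))).map (fun b => (a, b))
       else out) [] := by
  set edges : PySem.Set (String × String) := PySem.Set.ofList (pvEdges keys g) with hE
  set two_step : PySem.Set (String × String) := PySem.Set.ofList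
    (edges.flatMap (fun p => edges.filterMap (fun q =>
      if p.2 == q.1 then some (p.1, q.2) else none))) with hT
  set covers := PySem.Set.diff edges two_step with hC
  -- membership characterisations
  have hedge : ∀ p : String × String, p ∈ edges ↔
      p.1 ∈ keys ∧ p.2 ∈ keys ∧ p.1 ≠ p.2 ∧ (g p.1).isEmpty = false ∧ pvSetLt (g p.1) (g p.2) = true := by
    intro p
    rw [hE, PySem.Set.mem_ofList]
    exact mem_pvEdges keys g p
  have htwo : ∀ a b : String, (a, b) ∈ two_step ↔ ∃ c, (a, c) ∈ edges ∧ (c, b) ∈ edges := by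
    intro a b
    rw [hT, PySem.Set.mem_ofList]
    simp only [List.mem_flatMap, List.mem_filterMap]
    constructor
    · rintro ⟨p, hp, q, hq, h⟩
      split at h
      · rename_i hc
        obtain ⟨h1, h2⟩ := Prod.mk.injEq .. ▸ Option.some.injEq .. ▸ h
        refine ⟨p.2, ?_, ?_⟩
        · rw [← h1, Prod.mk.eta]; exact hp
        · rw [← h2, eq_of_beq hc, Prod.mk.eta]; exact hq
      · exact absurd h (by simp)
    · rintro ⟨c, h1, h2⟩
      exact ⟨(a, c), h1, (c, b), h2, by simp⟩
  -- covers membership equals A's inner boolean, for a, b drawn from keys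
  have hcov : ∀ a ∈ keys, ∀ b ∈ keys,
      PySem.Set.contains covers (a, b) =
        (!(a == b) && !((g a).isEmpty || !(pvSetLt (g a) (g b))) &&
          keys.all (fun c => if c == a || c == b then true
            else !(pvSetLt (g a) (g c) && pvSetLt (g c) (g b)))) := by
    intro a ha b hb
    rw [Bool.eq_iff_iff, PySem.Set.contains_iff,
      hC, PySem.Set.mem_diff,
      hedge, htwo]
    simp only [Bool.and_eq_true, Bool.not_eq_true', Bool.or_eq_false_iff,
      Bool.not_eq_false', beq_eq_false_iff_ne, ne_eq, List.all_eq_true]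
    constructor
    · rintro ⟨⟨_, _, hne, hemp, hlt⟩, hnot⟩
      refine ⟨⟨hne, hemp, hlt⟩, ?_⟩
      intro c hc
      by_cases hcab : (c == a || c == b) = true
      · rw [if_pos hcab]
      · rw [if_neg hcab]
        simp only [Bool.or_eq_true, not_or, Bool.not_eq_true] at hcab
        simp only [Bool.not_eq_true', Bool.and_eq_false_iff]
        by_contra hx
        simp only [not_or, Bool.not_eq_false] at hx
        exact hnot ⟨c, (hedge (a, c)).2 ⟨ha, hc, fun h => by have h' : a = c := h; rw [h', pvSetLt_irrefl] at hx; exact Bool.false_ne_true hx.1, hemp, hx.1⟩,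
          (hedge (c, b)).2 ⟨hc, hb, by simpa using hcab.2, pvSetLt_ne_nil hx.1, hx.2⟩⟩
    · rintro ⟨⟨hne, hemp, hlt⟩, hall⟩
      refine ⟨⟨ha, hb, hne, hemp, hlt⟩, ?_⟩
      rintro ⟨c, h1, h2⟩
      obtain ⟨_, hck, hac, _, hltac⟩ := (hedge (a, c)).1 h1
      obtain ⟨_, _, hcb, _, hltcb⟩ := (hedge (c, b)).1 h2
      have := hall c hck
      rw [if_neg (by simp [Ne.symm hac, hcb]), hltac, hltcb] at this
      simp at this
  -- the outer folds agree pointwise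
  apply PySem.List.foldl_congr_mem
  intro acc a ha
  by_cases hm : ((g a).length : Int) < m
  · rw [if_pos hm, if_neg (by omega)]
  · rw [if_neg hm, if_pos (by omega)]
    -- A's inner fold as a filter-append
    rw [PySem.List.foldl_congr_mem keys _
        (fun out b => if (!(a == b) && !((g a).isEmpty || !(pvSetLt (g a) (g b))) &&
          keys.all (fun c => if c == a || c == b then true
            else !(pvSetLt (g a) (g c) && pvSetLt (g c) (g b)))) then out ++ [(a, b)] else out)
        acc ?_]
    · rw [PySem.List.foldl_append_if]
      congr 1
      congr 1
      apply List.filter_congr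
      intro b hb
      exact (hcov a ha b hb).symm
    · intro out b _
      cases h1 : (a == b) with
      | true => simp [h1]
      | false =>
        cases h2 : ((g a).isEmpty || !(pvSetLt (g a) (g b))) with
        | true => simp [h1, h2]
        | false => simp [h1, h2]

theorem pv_main (relation : List (String × List String)) (m : Int) :
    find_inheritance_pairs_py relation m = find_inheritance_pairs_py_alt relation m := by
  simp only [find_inheritance_pairs_py, find_inheritance_pairs_py_alt]
  exact pv_core (relation.map Prod.fst) (pvGet relation) m

-- ===== VERDICT (by name: the statement is the Claim_ definition above) =====
theorem find_inheritance_pairs_py_spec : Claim_equal_find_inheritance_pairs_py := by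
  intro relation m _ _
  unfold Spec_find_inheritance_pairs_py
  exact pv_main relation m
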